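-- pv_equiv track=rewrite | github.com/rhseung/ps | 11000/11691 - LCM(i, j)/11691 - LCM(i, j).py | sieve_g
-- ===== SOURCE A (Python) =====
-- MOD = 1_000_000_007
--
-- def sieve_g(n: int):
--     is_prime = [True] * (n + 1)
--     is_prime[0] = is_prime[1] = False
--     h = [1] * (n + 1)
--
--     for p in range(2, n+1):
--         if is_prime[p]:
--             step = p
--             for k in range(p * p, n + 1, step):
--                 is_prime[k] = False
--             factor = (1 - p) % MOD
--             for m in range(p, n+1, p):
--                 h[m] = (h[m] * factor) % MOD
--
--     g = [0] * (n + 1)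
--     for m in range(1, n+1):
--         g[m] = (m % MOD) * h[m] % MOD
--     return g
-- ===== SOURCE B (Python) =====
-- MOD = 1_000_000_007
--
-- def sieve_g(n: int):
--     # smallest-prime-factor sieve, then a DP recurrence h[m] = h[m//p] * (1-p) for new p
--     spf = [0] * (n + 1)
--     for d in range(2, n + 1):
--         if spf[d] == 0:
--             for k in range(d, n + 1, d):
--                 if spf[k] == 0:
--                     spf[k] = d
--
--     h = [1] * (n + 1)
--     for m in range(2, n + 1):
--         p = spf[m]
--         q = m // p
--         if q % p == 0:
--             h[m] = h[q]
--         else: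
--             h[m] = h[q] * ((1 - p) % MOD) % MOD
--
--     g = [0] * (n + 1)
--     for m in range(1, n + 1):
--         g[m] = (m % MOD) * h[m] % MOD
--     return g
-- ===== Notes on version B (the rewrite author's own statement) =====
-- stated objective: alternative
-- what changed: Replaces Eratosthenes marking plus a separate per-prime multiplicative pass over all multiples by a smallest-prime-factor sieve followed by a DP recurrence h[m]=h[m//p] (times (1-p)%MOD when p is a new prime factor), so each h value is produced by one O(1) step from a smaller index instead of one update per prime in every per-prime pass.
-- outside the precondition, e.g. on sieve_g(0): A raises IndexError, B returns [0]
import Mathlib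
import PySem

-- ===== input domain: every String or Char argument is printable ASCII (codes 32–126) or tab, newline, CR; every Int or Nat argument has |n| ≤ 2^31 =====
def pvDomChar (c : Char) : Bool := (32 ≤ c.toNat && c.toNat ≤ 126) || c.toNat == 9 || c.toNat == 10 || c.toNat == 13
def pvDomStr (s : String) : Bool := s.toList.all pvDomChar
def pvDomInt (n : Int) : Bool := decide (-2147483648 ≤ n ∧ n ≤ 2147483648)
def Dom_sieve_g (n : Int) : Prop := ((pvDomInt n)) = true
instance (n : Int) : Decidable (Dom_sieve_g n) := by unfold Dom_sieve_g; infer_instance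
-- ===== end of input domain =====

-- B replaces the Eratosthenes sieve + per-prime multiplicative passes by a smallest-prime-factor
-- sieve followed by a DP recurrence h[m] = h[m//p]·(1-p): a different algorithm of comparable cost.


-- MOD constant of the module (shared by both ports, like Python's module-level MOD)
def pvMOD : Int := 1000000007

-- the final loop 'g = [0]*(n+1); for m in range(1, n+1): g[m] = (m % MOD) * h[m] % MOD'
-- is textually identical in A and in B, so both ports share this helper
def pvGBuild (n : Int) (h : List Int) : List Int :=
  (PySem.List.pyRange 1 (n+1) 1).foldl
    (fun g m => PySem.List.pySetD g m
      (PySem.Int.mod (PySem.Int.mod m pvMOD * PySem.List.pyGetD h m 0) pvMOD))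
    (List.replicate (n+1).toNat 0)

-- ===== PORT A =====
-- 'for k in range(p*p, n+1, step): is_prime[k] = False'
def sieveA_mark (n p : Int) (ip : List Bool) : List Bool :=
  (PySem.List.pyRange (p*p) (n+1) p).foldl (fun ip k => PySem.List.pySetD ip k false) ip

-- 'factor = (1-p) % MOD; for m in range(p, n+1, p): h[m] = (h[m] * factor) % MOD'
def sieveA_hup (n p : Int) (h : List Int) : List Int :=
  (PySem.List.pyRange p (n+1) p).foldl
    (fun h m => PySem.List.pySetD h m
      (PySem.Int.mod (PySem.List.pyGetD h m 0 * PySem.Int.mod (1 - p) pvMOD) pvMOD)) h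

def sieveA_step (n : Int) (st : List Bool × List Int) (p : Int) : List Bool × List Int :=
  if PySem.List.pyGetD st.1 p false then (sieveA_mark n p st.1, sieveA_hup n p st.2) else st

def sieve_g (n : Int) : List Int :=
  let is_prime := PySem.List.pySetD (PySem.List.pySetD (List.replicate (n+1).toNat true) 0 false) 1 false
  let h := List.replicate (n+1).toNat (1:Int)
  let st := (PySem.List.pyRange 2 (n+1) 1).foldl (sieveA_step n) (is_prime, h)
  pvGBuild n st.2

-- ===== PORT B =====
-- 'if spf[d] == 0: for k in range(d, n+1, d): if spf[k] == 0: spf[k] = d'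
def sieveB_spfStep (n : Int) (spf : List Int) (d : Int) : List Int :=
  if PySem.List.pyGetD spf d 0 = 0 then
    (PySem.List.pyRange d (n+1) d).foldl
      (fun spf k => if PySem.List.pyGetD spf k 0 = 0 then PySem.List.pySetD spf k d else spf) spf
  else spf

-- 'p = spf[m]; q = m // p; h[m] = h[q] if q % p == 0 else h[q] * ((1-p) % MOD) % MOD'
def sieveB_hStep (spf : List Int) (h : List Int) (m : Int) : List Int :=
  let p := PySem.List.pyGetD spf m 0
  let q := PySem.Int.floordiv m p
  if PySem.Int.mod q p = 0 then PySem.List.pySetD h m (PySem.List.pyGetD h q 0)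
  else PySem.List.pySetD h m
    (PySem.Int.mod (PySem.List.pyGetD h q 0 * PySem.Int.mod (1 - p) pvMOD) pvMOD)

def sieve_g_alt (n : Int) : List Int :=
  let spf := (PySem.List.pyRange 2 (n+1) 1).foldl (sieveB_spfStep n) (List.replicate (n+1).toNat 0)
  let h := (PySem.List.pyRange 2 (n+1) 1).foldl (sieveB_hStep spf) (List.replicate (n+1).toNat (1:Int))
  pvGBuild n h

-- ===== PRECONDITION & SPEC =====
-- Pre_ excludes n ≤ 0, on which Python A raises IndexError ('is_prime[1] = False' on a list of length ≤ 1)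
def Pre_sieve_g (n : Int) : Prop := 1 ≤ n
instance (n : Int) : Decidable (Pre_sieve_g n) := by unfold Pre_sieve_g; infer_instance

def pvWitness_sieve_g : Int := 6

def Spec_sieve_g (n : Int) (out : List Int) : Prop := out = sieve_g_alt n
instance (n : Int) (out : List Int) : Decidable (Spec_sieve_g n out) := by unfold Spec_sieve_g; infer_instance

-- ===== CLAIM (what is proved, stated in full; the proofs are below) =====
def Claim_equal_sieve_g : Prop := ∀ (n : Int), Dom_sieve_g n → Pre_sieve_g n → Spec_sieve_g n (sieve_g n)

-- ===== LEMMAS AND PROOFS =====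

lemma pv_nodup_pyRange_pos (a b s : Int) (hs : 0 < s) : (PySem.List.pyRange a b s).Nodup := by
  rw [PySem.List.pyRange_of_pos a b hs]
  refine List.Nodup.map ?_ (List.nodup_range)
  intro x y h
  have h2 : s * (x:Int) = s * (y:Int) := by linarith [h]
  have := mul_left_cancel₀ (ne_of_gt hs) h2
  exact_mod_cast this

lemma pv_mem_pyRange_nat (a b s j : ℕ) (hs : 0 < s) (ha : s ∣ a) :
    ((j:Int) ∈ PySem.List.pyRange (a:Int) (b:Int) (s:Int)) ↔ (a ≤ j ∧ j < b ∧ s ∣ j) := by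
  rw [PySem.List.mem_pyRange_iff_of_pos (by exact_mod_cast hs)]
  have hsa : (s:Int) ∣ (a:Int) := Int.natCast_dvd_natCast.2 ha
  constructor
  · rintro ⟨h1, h2, h3⟩
    refine ⟨by exact_mod_cast h1, by exact_mod_cast h2, ?_⟩
    have : (s:Int) ∣ (j:Int) := by
      have := dvd_add h3 hsa; simpa using this
    exact_mod_cast this
  · rintro ⟨h1, h2, h3⟩
    exact ⟨by exact_mod_cast h1, by exact_mod_cast h2, dvd_sub (Int.natCast_dvd_natCast.2 h3) hsa⟩

lemma pv_foldl_pointwise {α : Type} (d : α) (body : Int → α → α) :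
    ∀ (I : List Int) (step : List α → Int → List α), I.Nodup →
    (∀ l i, i ∈ I → (step l i).length = l.length) →
    (∀ (l : List α) (i : Int), i ∈ I → ∀ j, j < l.length →
        (step l i).getD j d = if (j : Int) = i then body i (l.getD j d) else l.getD j d) →
    ∀ (l : List α), (I.foldl step l).length = l.length ∧
      ∀ j, j < l.length → (I.foldl step l).getD j d =
        if (j:Int) ∈ I then body (j:Int) (l.getD j d) else l.getD j d := by
  intro I
  induction I with
  | nil => intro step _ _ _ l; exact ⟨rfl, fun j _ => by simp⟩
  | cons i I ih =>
    intro step hnd hlen hstep l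
    have hnd' := hnd.of_cons
    have hi : i ∉ I := (List.nodup_cons.1 hnd).1
    have hlen' : ∀ l i', i' ∈ I → (step l i').length = l.length := fun l i' h => hlen l i' (List.mem_cons_of_mem _ h)
    have hstep' : ∀ (l : List α) (i' : Int), i' ∈ I → ∀ j, j < l.length →
        (step l i').getD j d = if (j : Int) = i' then body i' (l.getD j d) else l.getD j d :=
      fun l i' h => hstep l i' (List.mem_cons_of_mem _ h)
    obtain ⟨ihlen, ihval⟩ := ih step hnd' hlen' hstep' (step l i)
    have hsl : (step l i).length = l.length := hlen l i (List.mem_cons_self ..)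
    constructor
    · simpa [List.foldl_cons, hsl] using ihlen
    · intro j hj
      have hj' : j < (step l i).length := by omega
      have hv := ihval j hj'
      have hstepv := hstep l i (List.mem_cons_self ..) j hj
      simp only [List.foldl_cons]
      rw [hv, hstepv]
      by_cases hji : (j:Int) = i
      · simp [hji, hi]
      · by_cases hjI : (j:Int) ∈ I <;> simp [hji, hjI, List.mem_cons]

-- getD / set toolbox
lemma pv_getD_set_ne {α : Type} (l : List α) (i j : ℕ) (v d : α) (h : j ≠ i) :
    (l.set i v).getD j d = l.getD j d := by
  simp [List.getD_eq_getElem?_getD, List.getElem?_set_ne (Ne.symm h)]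

lemma pv_getD_set_self {α : Type} (l : List α) (i : ℕ) (v d : α) (h : i < l.length) :
    (l.set i v).getD i d = v := by
  simp [List.getD_eq_getElem?_getD, h]

lemma pv_setD_getD {α : Type} (l : List α) (i : Int) (hi : 0 ≤ i) (v d : α) (j : ℕ) (hj : j < l.length) :
    (PySem.List.pySetD l i v).getD j d = if (j:Int) = i then v else l.getD j d := by
  rw [PySem.List.pySetD_of_nonneg l v hi]
  by_cases h : j = i.toNat
  · subst h
    rw [pv_getD_set_self _ _ _ _ hj, if_pos (by omega)]
  · rw [pv_getD_set_ne _ _ _ _ _ h, if_neg (by omega)]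

-- specs
lemma pv_val_one : (((1 : ZMod 1000000007).val : ℕ) : Int) = 1 := by
  haveI : Fact (1 < 1000000007) := ⟨by norm_num⟩
  rw [ZMod.val_one]
  norm_num

def ipSpec (t k : ℕ) : Bool := decide (2 ≤ k ∧ ∀ p, p ≤ t → p.Prime → p ∣ k → k < p*p)
def hProd (t m : ℕ) : ZMod 1000000007 := ∏ p ∈ m.primeFactors.filter (fun p => p ≤ t), (1 - (p:ZMod 1000000007))
def hFull (m : ℕ) : ZMod 1000000007 := ∏ p ∈ m.primeFactors, (1 - (p:ZMod 1000000007))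
def gS (m : ℕ) : Int := (((m : ZMod 1000000007) * hFull m).val : Int)


lemma pv_mod_int_zmod (a : Int) : PySem.Int.mod a 1000000007 = (((a : ZMod 1000000007)).val : Int) := by
  rw [PySem.Int.mod_eq_emod_of_pos (by norm_num)]
  rw [ZMod.val_intCast]
  norm_num

lemma pv_mod_val_mul (x y : ZMod 1000000007) :
    PySem.Int.mod ((x.val:Int) * (y.val:Int)) 1000000007 = (((x*y).val : ℕ) : Int) := by
  rw [pv_mod_int_zmod]
  have h : (((x.val:Int) * (y.val:Int) : Int) : ZMod 1000000007) = x * y := by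
    push_cast
    rw [ZMod.natCast_zmod_val, ZMod.natCast_zmod_val]
  rw [h]

lemma pv_prime_iff (k : ℕ) (h2 : 2 ≤ k) :
    (∀ p, p < k → p.Prime → p ∣ k → k < p*p) ↔ k.Prime := by
  constructor
  · intro h
    by_contra hnp
    have hmf := Nat.minFac_sq_le_self (by omega) hnp
    have hd := Nat.minFac_dvd k
    have hp : (Nat.minFac k).Prime := Nat.minFac_prime (by omega)
    have hlt : k.minFac < k := by
      rcases (Nat.le_of_dvd (by omega) hd).lt_or_eq with h'|h'
      · exact h'
      · exact absurd (h' ▸ hp) hnp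
    have := h _ hlt hp hd
    nlinarith [sq_nonneg k.minFac]
  · intro hk p hlt hp hd
    rcases (Nat.Prime.eq_one_or_self_of_dvd hk p hd) with h|h
    · exact absurd h hp.ne_one
    · omega

lemma pv_ipSpec_self (t : ℕ) : (ipSpec t (t+1) = true) ↔ (t+1).Prime := by
  unfold ipSpec
  rw [decide_eq_true_iff]
  constructor
  · rintro ⟨h2, hall⟩
    exact (pv_prime_iff (t+1) h2).1 (fun p hlt hp hd => hall p (by omega) hp hd)
  · intro hp
    exact ⟨hp.two_le, fun p hle hpp hd => (pv_prime_iff (t+1) hp.two_le).2 hp p (by omega) hpp hd⟩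

lemma pv_ipSpec_step_prime (t j : ℕ) (hp : (t+1).Prime) :
    ipSpec (t+1) j = if ((t+1)*(t+1) ≤ j ∧ (t+1) ∣ j) then false else ipSpec t j := by
  by_cases hin : (t+1)*(t+1) ≤ j ∧ (t+1) ∣ j
  · rw [if_pos hin]
    unfold ipSpec
    rw [decide_eq_false_iff_not]
    rintro ⟨h2, hall⟩
    have := hall (t+1) le_rfl hp hin.2
    omega
  · rw [if_neg hin]
    unfold ipSpec
    rw [decide_eq_decide]
    constructor
    · rintro ⟨h2, hall⟩
      exact ⟨h2, fun p hle hpp hd => hall p (by omega) hpp hd⟩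
    · rintro ⟨h2, hall⟩
      refine ⟨h2, fun p hle hpp hd => ?_⟩
      by_cases hpt : p ≤ t
      · exact hall p hpt hpp hd
      · have hpe : p = t+1 := by omega
        subst hpe
        by_contra hc
        exact hin ⟨by omega, hd⟩

lemma pv_ipSpec_step_comp (t j : ℕ) (hp : ¬ (t+1).Prime) :
    ipSpec (t+1) j = ipSpec t j := by
  unfold ipSpec
  rw [decide_eq_decide]
  constructor
  · rintro ⟨h2, hall⟩
    exact ⟨h2, fun p hle hpp hd => hall p (by omega) hpp hd⟩
  · rintro ⟨h2, hall⟩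
    refine ⟨h2, fun p hle hpp hd => ?_⟩
    by_cases hpt : p ≤ t
    · exact hall p hpt hpp hd
    · have : p = t+1 := by omega
      exact absurd (this ▸ hpp) hp

lemma pv_hProd_filter_prime (t j : ℕ) (hp : (t+1).Prime) :
    hProd (t+1) j = if (t+1 ≤ j ∧ (t+1) ∣ j) then (1 - ((t+1 : ℕ) : ZMod 1000000007)) * hProd t j else hProd t j := by
  by_cases hin : t+1 ≤ j ∧ (t+1) ∣ j
  · rw [if_pos hin]
    have hmem : t+1 ∈ j.primeFactors := Nat.mem_primeFactors.2 ⟨hp, hin.2, by omega⟩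
    have hfil : j.primeFactors.filter (fun p => p ≤ t+1)
        = insert (t+1) (j.primeFactors.filter (fun p => p ≤ t)) := by
      ext p
      simp only [Finset.mem_filter, Finset.mem_insert]
      constructor
      · rintro ⟨hpf, hle⟩
        by_cases hpe : p = t+1
        · exact Or.inl hpe
        · exact Or.inr ⟨hpf, by omega⟩
      · rintro (hpe | ⟨hpf, hle⟩)
        · exact ⟨hpe ▸ hmem, by omega⟩
        · exact ⟨hpf, by omega⟩
    have hnot : t+1 ∉ j.primeFactors.filter (fun p => p ≤ t) := by
      simp only [Finset.mem_filter]
      rintro ⟨_, hle⟩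
      omega
    unfold hProd
    rw [hfil, Finset.prod_insert hnot]
  · rw [if_neg hin]
    have hfil : j.primeFactors.filter (fun p => p ≤ t+1)
        = j.primeFactors.filter (fun p => p ≤ t) := by
      ext p
      simp only [Finset.mem_filter]
      constructor
      · rintro ⟨hpf, hle⟩
        refine ⟨hpf, ?_⟩
        by_cases hpe : p = t+1
        · subst hpe
          obtain ⟨_, hd, hj0⟩ := Nat.mem_primeFactors.1 hpf
          exact absurd ⟨Nat.le_of_dvd (by omega) hd, hd⟩ hin
        · omega
      · rintro ⟨hpf, hle⟩
        exact ⟨hpf, by omega⟩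
    unfold hProd
    rw [hfil]

lemma pv_hProd_filter_comp (t j : ℕ) (hp : ¬ (t+1).Prime) :
    hProd (t+1) j = hProd t j := by
  have hfil : j.primeFactors.filter (fun p => p ≤ t+1)
      = j.primeFactors.filter (fun p => p ≤ t) := by
    ext p
    simp only [Finset.mem_filter]
    constructor
    · rintro ⟨hpf, hle⟩
      refine ⟨hpf, ?_⟩
      by_cases hpe : p = t+1
      · exact absurd (hpe ▸ (Nat.mem_primeFactors.1 hpf).1) hp
      · omega
    · rintro ⟨hpf, hle⟩
      exact ⟨hpf, by omega⟩
  unfold hProd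
  rw [hfil]

-- A-side invariant
lemma pv_A_inv (nn t : ℕ) (h1 : 1 ≤ t) (ht : t ≤ nn) :
    ∀ st0 : List Bool × List Int, st0.1.length = nn+1 → st0.2.length = nn+1 →
    (∀ j, j < nn+1 → st0.1.getD j false = ipSpec 1 j) →
    (∀ j, j < nn+1 → st0.2.getD j 0 = ((hProd 1 j).val : Int)) →
    let st := (PySem.List.pyRange 2 ((t:Int)+1) 1).foldl (sieveA_step (nn:Int)) st0
    st.1.length = nn+1 ∧ st.2.length = nn+1 ∧
    (∀ j, j < nn+1 → st.1.getD j false = ipSpec t j) ∧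
    (∀ j, j < nn+1 → st.2.getD j 0 = ((hProd t j).val : Int)) := by
  induction t, h1 using Nat.le_induction with
  | base =>
    intro st0 hl1 hl2 hv1 hv2
    rw [show ((1:ℕ):Int)+1 = 2 by norm_num, PySem.List.pyRange_one_eq_nil (le_refl 2)]
    exact ⟨hl1, hl2, hv1, hv2⟩
  | succ t ht' ih =>
    intro st0 hl1 hl2 hv1 hv2
    have hrange : PySem.List.pyRange 2 (((t+1:ℕ):Int)+1) 1 = PySem.List.pyRange 2 ((t:Int)+1) 1 ++ [(t:Int)+1] := by
      push_cast
      exact PySem.List.pyRange_one_succ_right (by omega)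
    rw [hrange, List.foldl_append]
    obtain ⟨plen1, plen2, pval1, pval2⟩ := ih (by omega) st0 hl1 hl2 hv1 hv2
    set prev := (PySem.List.pyRange 2 ((t:Int)+1) 1).foldl (sieveA_step (nn:Int)) st0 with hprev
    simp only [List.foldl_cons, List.foldl_nil]
    have hmn : t+1 < nn+1 := by omega
    have hcond : PySem.List.pyGetD prev.1 ((t:Int)+1) false = ipSpec t (t+1) := by
      rw [show ((t:Int)+1) = ((t+1:ℕ):Int) by push_cast; ring, PySem.List.pyGetD_natCast]
      exact pval1 (t+1) hmn
    unfold sieveA_step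
    rw [hcond]
    by_cases hprime : (t+1).Prime
    · rw [if_pos ((pv_ipSpec_self t).2 hprime)]
      -- marking loop
      have keyM := pv_foldl_pointwise (α := Bool) false
        (fun _ _ => false)
        (PySem.List.pyRange (((t:Int)+1)*((t:Int)+1)) ((nn:Int)+1) ((t:Int)+1))
        (fun ip k => PySem.List.pySetD ip k false)
        (pv_nodup_pyRange_pos _ _ _ (by omega))
        (fun l i _ => PySem.List.length_pySetD l i false)
        (fun l i hi j hj => by
          have h1i : ((t:Int)+1)*((t:Int)+1) ≤ i := (PySem.List.mem_pyRange_iff_of_pos (by omega) i |>.1 hi).1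
          exact pv_setD_getD l i (by nlinarith) false false j hj)
        prev.1
      obtain ⟨kMlen, kMval⟩ := keyM
      -- h loop
      have keyH := pv_foldl_pointwise (α := Int) 0
        (fun _ old => PySem.Int.mod (old * PySem.Int.mod (1 - ((t:Int)+1)) pvMOD) pvMOD)
        (PySem.List.pyRange ((t:Int)+1) ((nn:Int)+1) ((t:Int)+1))
        (fun h m => PySem.List.pySetD h m
          (PySem.Int.mod (PySem.List.pyGetD h m 0 * PySem.Int.mod (1 - ((t:Int)+1)) pvMOD) pvMOD))
        (pv_nodup_pyRange_pos _ _ _ (by omega))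
        (fun l i _ => PySem.List.length_pySetD l i _)
        (fun l i hi j hj => by
          dsimp only
          have h1i : ((t:Int)+1) ≤ i := (PySem.List.mem_pyRange_iff_of_pos (by omega) i |>.1 hi).1
          rw [pv_setD_getD l i (by omega) _ 0 j hj]
          by_cases hji : (j:Int) = i
          · rw [if_pos hji, if_pos hji, ← hji, PySem.List.pyGetD_natCast]
          · rw [if_neg hji, if_neg hji])
        prev.2
      obtain ⟨kHlen, kHval⟩ := keyH
      refine ⟨by simpa [sieveA_mark, plen1] using kMlen, by simpa [sieveA_hup, plen2] using kHlen, ?_, ?_⟩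
      · intro j hj
        show (sieveA_mark (nn:Int) ((t:Int)+1) prev.1).getD j false = _
        unfold sieveA_mark
        rw [kMval j (by omega), pval1 j hj]
        have hmem : ((j:Int) ∈ PySem.List.pyRange (((t:Int)+1)*((t:Int)+1)) ((nn:Int)+1) ((t:Int)+1))
            ↔ ((t+1)*(t+1) ≤ j ∧ j < nn+1 ∧ (t+1) ∣ j) := by
          rw [show ((t:Int)+1)*((t:Int)+1) = (((t+1)*(t+1) : ℕ) : Int) by push_cast; ring,
            show ((nn:Int)+1) = ((nn+1:ℕ):Int) by push_cast; ring,
            show ((t:Int)+1) = ((t+1:ℕ):Int) by push_cast; ring]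
          exact pv_mem_pyRange_nat _ _ _ j (by omega) (Dvd.intro _ rfl)
        rw [pv_ipSpec_step_prime t j hprime]
        by_cases hin : (t+1)*(t+1) ≤ j ∧ (t+1) ∣ j
        · rw [if_pos (hmem.2 ⟨hin.1, hj, hin.2⟩), if_pos hin]
        · rw [if_neg (fun hc => hin (by have := hmem.1 hc; exact ⟨this.1, this.2.2⟩)), if_neg hin]
      · intro j hj
        show (sieveA_hup (nn:Int) ((t:Int)+1) prev.2).getD j 0 = _
        unfold sieveA_hup
        rw [kHval j (by omega), pval2 j hj]
        have hmem : ((j:Int) ∈ PySem.List.pyRange ((t:Int)+1) ((nn:Int)+1) ((t:Int)+1))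
            ↔ (t+1 ≤ j ∧ j < nn+1 ∧ (t+1) ∣ j) := by
          rw [show ((nn:Int)+1) = ((nn+1:ℕ):Int) by push_cast; ring,
            show ((t:Int)+1) = ((t+1:ℕ):Int) by push_cast; ring]
          exact pv_mem_pyRange_nat _ _ _ j (by omega) dvd_rfl
        have hstep := pv_hProd_filter_prime t j hprime
        by_cases hin : t+1 ≤ j ∧ (t+1) ∣ j
        · rw [if_pos (hmem.2 ⟨hin.1, hj, hin.2⟩)]
          rw [if_pos hin] at hstep
          show PySem.Int.mod (((hProd t j).val : Int) * PySem.Int.mod (1 - ((t:Int)+1)) pvMOD) pvMOD = _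
          simp only [pvMOD]
          rw [pv_mod_int_zmod (1 - ((t:Int)+1)), pv_mod_val_mul, hstep]
          have : (((1 - ((t:Int)+1)) : Int) : ZMod 1000000007) = 1 - (((t+1:ℕ)) : ZMod 1000000007) := by
            push_cast; ring
          rw [this, mul_comm]
        · rw [if_neg (fun hc => hin (by have := hmem.1 hc; exact ⟨this.1, this.2.2⟩))]
          rw [if_neg hin] at hstep
          rw [hstep]
    · rw [if_neg (by rw [(pv_ipSpec_self t).symm] at hprime; simpa using hprime)]
      refine ⟨plen1, plen2, fun j hj => ?_, fun j hj => ?_⟩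
      · rw [pval1 j hj, pv_ipSpec_step_comp t j hprime]
      · rw [pval2 j hj, pv_hProd_filter_comp t j hprime]

-- B-side spf invariant
def spfSpec (t k : ℕ) : Int := if 2 ≤ k ∧ k.minFac ≤ t then (k.minFac : Int) else 0

-- spfSpec step, prime case
lemma pv_spfSpec_step_prime (t j : ℕ) (hp : (t+1).Prime) :
    (if t+1 ≤ j ∧ (t+1) ∣ j then (if spfSpec t j = 0 then ((t+1:ℕ):Int) else spfSpec t j) else spfSpec t j)
      = spfSpec (t+1) j := by
  have hmp := Nat.minFac_pos j
  unfold spfSpec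
  by_cases hin : t+1 ≤ j ∧ (t+1) ∣ j
  · have hj2 : 2 ≤ j := le_trans hp.two_le hin.1
    have hmfle : j.minFac ≤ t+1 := Nat.minFac_le_of_dvd hp.two_le hin.2
    simp only [if_pos hin]
    by_cases h0 : j.minFac ≤ t
    · simp only [if_pos (⟨hj2, h0⟩ : 2 ≤ j ∧ j.minFac ≤ t)]
      rw [if_neg (by exact_mod_cast (by omega : j.minFac ≠ 0)),
        if_pos (⟨hj2, by omega⟩ : 2 ≤ j ∧ j.minFac ≤ t+1)]
    · have hmf : j.minFac = t+1 := by omega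
      simp only [if_neg (fun h : 2 ≤ j ∧ j.minFac ≤ t => h0 h.2)]
      rw [if_pos trivial, if_pos (⟨hj2, by omega⟩ : 2 ≤ j ∧ j.minFac ≤ t+1)]
      exact_mod_cast hmf.symm
  · rw [if_neg hin]
    by_cases hj2 : 2 ≤ j
    · by_cases h0 : j.minFac ≤ t
      · rw [if_pos (⟨hj2, h0⟩ : 2 ≤ j ∧ j.minFac ≤ t),
          if_pos (⟨hj2, by omega⟩ : 2 ≤ j ∧ j.minFac ≤ t+1)]
      · have hne : j.minFac ≠ t+1 := by
          intro hc
          have hd := Nat.minFac_dvd j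
          rw [hc] at hd
          exact hin ⟨Nat.le_of_dvd (by omega) hd, hd⟩
        rw [if_neg (fun h : 2 ≤ j ∧ j.minFac ≤ t => h0 h.2),
          if_neg (fun h : 2 ≤ j ∧ j.minFac ≤ t+1 => by omega)]
    · rw [if_neg (fun h : 2 ≤ j ∧ j.minFac ≤ t => hj2 h.1),
        if_neg (fun h : 2 ≤ j ∧ j.minFac ≤ t+1 => hj2 h.1)]

lemma pv_spfSpec_step_comp (t j : ℕ) (hp : ¬ (t+1).Prime) :
    spfSpec (t+1) j = spfSpec t j := by
  unfold spfSpec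
  by_cases hj2 : 2 ≤ j
  · have hne : j.minFac ≠ t+1 := fun hc => hp (hc ▸ Nat.minFac_prime (by omega))
    by_cases h0 : j.minFac ≤ t
    · rw [if_pos (⟨hj2, by omega⟩ : 2 ≤ j ∧ j.minFac ≤ t+1),
        if_pos (⟨hj2, h0⟩ : 2 ≤ j ∧ j.minFac ≤ t)]
    · rw [if_neg (fun h : 2 ≤ j ∧ j.minFac ≤ t+1 => by omega),
        if_neg (fun h : 2 ≤ j ∧ j.minFac ≤ t => h0 h.2)]
  · rw [if_neg (fun h : 2 ≤ j ∧ j.minFac ≤ t+1 => hj2 h.1),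
      if_neg (fun h : 2 ≤ j ∧ j.minFac ≤ t => hj2 h.1)]

lemma pv_spfSpec_zero_iff (t d : ℕ) (h2 : 2 ≤ d) (hd : d = t+1) :
    (spfSpec t d = 0 ↔ d.Prime) := by
  subst hd
  unfold spfSpec
  have hmp := Nat.minFac_pos (t+1)
  have hmd := Nat.minFac_dvd (t+1)
  have hmle : (t+1).minFac ≤ t+1 := Nat.le_of_dvd (by omega) hmd
  constructor
  · intro h
    have : ¬ ((t+1).minFac ≤ t) := by
      intro hle
      rw [if_pos ⟨h2, hle⟩] at h
      omega
    have : (t+1).minFac = t+1 := by omega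
    exact Nat.prime_def_minFac.2 ⟨h2, this⟩
  · intro hp
    have := (Nat.prime_def_minFac.1 hp).2
    rw [if_neg]
    omega

lemma pv_B_spf_inv (nn t : ℕ) (h1 : 1 ≤ t) (ht : t ≤ nn) :
    ∀ l0 : List Int, l0.length = nn+1 →
    (∀ j, j < nn+1 → l0.getD j 0 = spfSpec 1 j) →
    let l := (PySem.List.pyRange 2 ((t:Int)+1) 1).foldl (sieveB_spfStep (nn:Int)) l0
    l.length = nn+1 ∧ (∀ j, j < nn+1 → l.getD j 0 = spfSpec t j) := by
  induction t, h1 using Nat.le_induction with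
  | base =>
    intro l0 hlen hval
    rw [show ((1:ℕ):Int)+1 = 2 by norm_num, PySem.List.pyRange_one_eq_nil (le_refl 2)]
    exact ⟨hlen, hval⟩
  | succ t ht' ih =>
    intro l0 hlen hval
    have hrange : PySem.List.pyRange 2 (((t+1:ℕ):Int)+1) 1 = PySem.List.pyRange 2 ((t:Int)+1) 1 ++ [(t:Int)+1] := by
      push_cast
      exact PySem.List.pyRange_one_succ_right (by omega)
    rw [hrange, List.foldl_append]
    obtain ⟨plen, pval⟩ := ih (by omega) l0 hlen hval
    set prev := (PySem.List.pyRange 2 ((t:Int)+1) 1).foldl (sieveB_spfStep (nn:Int)) l0 with hprev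
    simp only [List.foldl_cons, List.foldl_nil]
    have hd2 : 2 ≤ t+1 := by omega
    have hdn : t+1 < nn+1 := by omega
    have hcond : PySem.List.pyGetD prev ((t:Int)+1) 0 = spfSpec t (t+1) := by
      have : ((t:Int)+1) = ((t+1:ℕ):Int) := by push_cast; ring
      rw [this, PySem.List.pyGetD_natCast]
      exact pval (t+1) hdn
    unfold sieveB_spfStep
    rw [hcond]
    by_cases hprime : (t+1).Prime
    · rw [if_pos ((pv_spfSpec_zero_iff t (t+1) hd2 rfl).2 hprime)]
      have key := pv_foldl_pointwise (α := Int) 0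
        (fun i old => if old = 0 then ((t:Int)+1) else old)
        (PySem.List.pyRange ((t:Int)+1) ((nn:Int)+1) ((t:Int)+1))
        (fun spf k => if PySem.List.pyGetD spf k 0 = 0 then PySem.List.pySetD spf k ((t:Int)+1) else spf)
        (pv_nodup_pyRange_pos _ _ _ (by omega))
        (fun l i _ => by
          by_cases hc : PySem.List.pyGetD l i 0 = 0
          · simp [hc, PySem.List.length_pySetD]
          · simp [hc])
        (fun l i hi j hj => by
          dsimp only
          have h1i : ((t:Int)+1) ≤ i := (PySem.List.mem_pyRange_iff_of_pos (by omega) i |>.1 hi).1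
          have h0i : (0:Int) ≤ i := by omega
          have hgl : PySem.List.pyGetD l (↑j) 0 = l.getD j 0 := PySem.List.pyGetD_natCast l j 0
          by_cases hc : PySem.List.pyGetD l i 0 = 0
          · rw [if_pos hc, pv_setD_getD l i h0i _ 0 j hj]
            by_cases hji : (j:Int) = i
            · rw [if_pos hji, if_pos hji, if_pos]
              rw [← hgl, hji, hc]
            · rw [if_neg hji, if_neg hji]
          · rw [if_neg hc]
            by_cases hji : (j:Int) = i
            · rw [if_pos hji, if_neg]
              rw [← hgl, hji]
              exact hc
            · rw [if_neg hji])
        prev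
      obtain ⟨klen, kval⟩ := key
      refine ⟨by omega, ?_⟩
      intro j hj
      have hv := kval j (by omega)
      rw [hv, pval j hj]
      have hmem : ((j:Int) ∈ PySem.List.pyRange ((t:Int)+1) ((nn:Int)+1) ((t:Int)+1)) ↔ (t+1 ≤ j ∧ j < nn+1 ∧ (t+1) ∣ j) := by
        have hcast : ((t:Int)+1) = ((t+1:ℕ):Int) ∧ ((nn:Int)+1) = ((nn+1:ℕ):Int) := by constructor <;> push_cast <;> ring
        rw [hcast.1, hcast.2]
        exact pv_mem_pyRange_nat (t+1) (nn+1) (t+1) j (by omega) dvd_rfl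
      by_cases hin : t+1 ≤ j ∧ (t+1) ∣ j
      · rw [if_pos (hmem.2 ⟨hin.1, hj, hin.2⟩)]
        have := pv_spfSpec_step_prime t j hprime
        rw [if_pos hin] at this
        rw [← this]
        push_cast
        rfl
      · rw [if_neg (fun hc => hin (by have := hmem.1 hc; exact ⟨this.1, this.2.2⟩))]
        have := pv_spfSpec_step_prime t j hprime
        rw [if_neg hin] at this
        exact this
    · rw [if_neg (fun hc => hprime ((pv_spfSpec_zero_iff t (t+1) hd2 rfl).1 hc))]
      refine ⟨plen, fun j hj => ?_⟩
      rw [pval j hj, pv_spfSpec_step_comp t j hprime]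

-- B-side DP invariant
lemma pv_hFull_step (m : ℕ) (h2 : 2 ≤ m) :
    hFull m = if m.minFac ∣ (m / m.minFac) then hFull (m / m.minFac)
      else (1 - (m.minFac : ZMod 1000000007)) * hFull (m / m.minFac) := by
  have hdvd := Nat.minFac_dvd m
  have hP2 : 2 ≤ m.minFac := (Nat.minFac_prime (by omega)).two_le
  have hm : m.minFac * (m / m.minFac) = m := Nat.mul_div_cancel' hdvd
  have hQ1 : 1 ≤ m / m.minFac := Nat.one_le_div_iff (by omega) |>.2 (Nat.minFac_le (by omega))
  have hpf : m.primeFactors = {m.minFac} ∪ (m / m.minFac).primeFactors := by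
    conv_lhs => rw [← hm]
    rw [Nat.primeFactors_mul (by omega) (by omega),
      (Nat.minFac_prime (by omega : m ≠ 1)).primeFactors]
  by_cases hc : m.minFac ∣ (m / m.minFac)
  · rw [if_pos hc]
    have hmem : m.minFac ∈ (m / m.minFac).primeFactors :=
      Nat.mem_primeFactors.2 ⟨Nat.minFac_prime (by omega), hc, by omega⟩
    unfold hFull
    rw [hpf, Finset.singleton_union, Finset.insert_eq_self.2 hmem]
  · rw [if_neg hc]
    have hnmem : m.minFac ∉ (m / m.minFac).primeFactors := by
      intro hmem
      exact hc (Nat.mem_primeFactors.1 hmem).2.1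
    unfold hFull
    rw [hpf, Finset.singleton_union, Finset.prod_insert hnmem]

lemma pv_B_h_inv (nn t : ℕ) (h1 : 1 ≤ t) (ht : t ≤ nn) (spf : List Int)
    (hspf : ∀ j, j < nn+1 → spf.getD j 0 = spfSpec nn j) :
    ∀ l0 : List Int, l0.length = nn+1 →
    (∀ j, j < nn+1 → l0.getD j 0 = 1) →
    let l := (PySem.List.pyRange 2 ((t:Int)+1) 1).foldl (sieveB_hStep spf) l0
    l.length = nn+1 ∧ (∀ j, j < nn+1 → l.getD j 0 = if j ≤ t then ((hFull j).val : Int) else 1) := by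
  induction t, h1 using Nat.le_induction with
  | base =>
    intro l0 hlen hval
    rw [show ((1:ℕ):Int)+1 = 2 by norm_num, PySem.List.pyRange_one_eq_nil (le_refl 2)]
    simp only [List.foldl_nil]
    refine ⟨hlen, fun j hj => ?_⟩
    rw [hval j hj]
    by_cases hj1 : j ≤ 1
    · rw [if_pos hj1]
      interval_cases j
      · rw [show hFull 0 = 1 by unfold hFull; rw [Nat.primeFactors_zero, Finset.prod_empty],
          pv_val_one]
      · rw [show hFull 1 = 1 by unfold hFull; rw [Nat.primeFactors_one, Finset.prod_empty],
          pv_val_one]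
    · rw [if_neg hj1]
  | succ t ht' ih =>
    intro l0 hlen hval
    have hrange : PySem.List.pyRange 2 (((t+1:ℕ):Int)+1) 1 = PySem.List.pyRange 2 ((t:Int)+1) 1 ++ [(t:Int)+1] := by
      push_cast
      exact PySem.List.pyRange_one_succ_right (by omega)
    rw [hrange, List.foldl_append]
    obtain ⟨plen, pval⟩ := ih (by omega) l0 hlen hval
    set prev := (PySem.List.pyRange 2 ((t:Int)+1) 1).foldl (sieveB_hStep spf) l0 with hprev
    simp only [List.foldl_cons, List.foldl_nil]
    -- facts about m = t+1
    have h2m : 2 ≤ t+1 := by omega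
    have hmn : t+1 < nn+1 := by omega
    have hPp : (t+1).minFac.Prime := Nat.minFac_prime (by omega)
    have hP2 : 2 ≤ (t+1).minFac := hPp.two_le
    have hPle : (t+1).minFac ≤ t+1 := Nat.minFac_le (by omega)
    have hQle : (t+1) / (t+1).minFac ≤ t := by
      have h2 : (t+1) / (t+1).minFac ≤ (t+1) / 2 := Nat.div_le_div_left hP2 (by omega)
      omega
    have hQlt : (t+1) / (t+1).minFac < nn+1 := by omega
    -- the three Python expressions
    have hp : PySem.List.pyGetD spf ((t:Int)+1) 0 = (((t+1).minFac : ℕ) : Int) := by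
      rw [show ((t:Int)+1) = ((t+1:ℕ):Int) by push_cast; ring, PySem.List.pyGetD_natCast,
        hspf (t+1) hmn]
      unfold spfSpec
      rw [if_pos ⟨h2m, by omega⟩]
    have hq : PySem.Int.floordiv ((t:Int)+1) (((t+1).minFac : ℕ) : Int)
        = (((t+1) / (t+1).minFac : ℕ) : Int) := by
      rw [show ((t:Int)+1) = ((t+1:ℕ):Int) by push_cast; ring]
      exact PySem.Int.floordiv_natCast (t+1) (t+1).minFac
    have hcond : (PySem.Int.mod (((t+1) / (t+1).minFac : ℕ) : Int) (((t+1).minFac : ℕ) : Int) = 0)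
        ↔ ((t+1).minFac ∣ (t+1) / (t+1).minFac) := by
      rw [PySem.Int.mod_eq_zero_iff_dvd]
      exact Int.natCast_dvd_natCast
    have hprevQ : PySem.List.pyGetD prev (((t+1) / (t+1).minFac : ℕ) : Int) 0
        = ((hFull ((t+1) / (t+1).minFac)).val : Int) := by
      rw [PySem.List.pyGetD_natCast, pval _ hQlt, if_pos hQle]
    unfold sieveB_hStep
    simp only [hp, hq, pvMOD]
    have hmain : ∀ v : Int,
        v = ((hFull (t+1)).val : Int) →
        ((PySem.List.pySetD prev ((t:Int)+1) v).length = nn+1 ∧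
          ∀ j, j < nn+1 → (PySem.List.pySetD prev ((t:Int)+1) v).getD j 0
            = if j ≤ t+1 then ((hFull j).val : Int) else 1) := by
      intro v hv
      constructor
      · rw [PySem.List.length_pySetD]; exact plen
      · intro j hj
        rw [pv_setD_getD prev ((t:Int)+1) (by omega) v 0 j (by omega)]
        by_cases hjm : (j:Int) = (t:Int)+1
        · have : j = t+1 := by omega
          subst this
          rw [if_pos hjm, hv, if_pos (le_refl _)]
        · have hne : j ≠ t+1 := by omega
          rw [if_neg hjm, pval j hj]
          by_cases hjt : j ≤ t
          · rw [if_pos hjt, if_pos (by omega)]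
          · rw [if_neg hjt, if_neg (by omega)]
    by_cases hc : (t+1).minFac ∣ (t+1) / (t+1).minFac
    · rw [if_pos (hcond.2 hc)]
      apply hmain
      rw [hprevQ, pv_hFull_step (t+1) h2m, if_pos hc]
    · rw [if_neg (fun h => hc (hcond.1 h))]
      apply hmain
      rw [hprevQ, pv_mod_int_zmod (1 - (((t+1).minFac : ℕ) : Int)), pv_mod_val_mul]
      rw [pv_hFull_step (t+1) h2m, if_neg hc]
      have : (((1 - (((t+1).minFac : ℕ) : Int)) : Int) : ZMod 1000000007)
          = 1 - (((t+1).minFac : ℕ) : ZMod 1000000007) := by push_cast; ring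
      rw [this, mul_comm]

-- the shared final loop
lemma pv_gBuild_spec (nn : ℕ) (h : List Int)     (hval : ∀ j, j < nn+1 → h.getD j 0 = ((hFull j).val : Int)) :
    pvGBuild (nn:Int) h = (List.range (nn+1)).map gS := by
  unfold pvGBuild
  have htn : (((nn:Int))+1).toNat = nn+1 := by omega
  rw [htn]
  have key := pv_foldl_pointwise (α := Int) 0
    (fun i old => PySem.Int.mod (PySem.Int.mod i pvMOD * PySem.List.pyGetD h i 0) pvMOD)
    (PySem.List.pyRange 1 ((nn:Int)+1) 1)
    (fun g m => PySem.List.pySetD g m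
      (PySem.Int.mod (PySem.Int.mod m pvMOD * PySem.List.pyGetD h m 0) pvMOD))
    (pv_nodup_pyRange_pos _ _ _ one_pos)
    (fun l i _ => PySem.List.length_pySetD l i _)
    (fun l i hi j hj => by
      have h1 : (1:Int) ≤ i := (PySem.List.mem_pyRange_one.1 hi).1
      exact pv_setD_getD l i (by omega) _ 0 j hj)
    (List.replicate (nn+1) 0)
  obtain ⟨klen, kval⟩ := key
  apply List.ext_getElem
  · simpa using klen
  · intro j hj1 hj2
    have hjn : j < nn+1 := by simpa using hj2
    have hjl : j < (List.replicate (nn+1) (0:Int)).length := by simpa using hjn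
    have hv := kval j hjl
    rw [List.getD_replicate _ hjn] at hv
    have hgetElem : _ = _ := List.getD_eq_getElem _ (0:Int) hj1
    rw [← hgetElem, hv]
    rw [List.getElem_map, List.getElem_range]
    by_cases hj0 : 1 ≤ j
    · have hmem : ((j:Int)) ∈ PySem.List.pyRange 1 ((nn:Int)+1) 1 := by
        rw [PySem.List.mem_pyRange_one]; omega
      rw [if_pos hmem]
      show PySem.Int.mod (PySem.Int.mod (j:Int) pvMOD * PySem.List.pyGetD h (j:Int) 0) pvMOD = gS j
      rw [PySem.List.pyGetD_natCast, hval j hjn]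
      show PySem.Int.mod (PySem.Int.mod (j:Int) 1000000007 * _) 1000000007 = gS j
      rw [pv_mod_int_zmod (j:Int)]
      have hc : (((j:Int)) : ZMod 1000000007) = (j : ZMod 1000000007) := by push_cast; rfl
      rw [hc, pv_mod_val_mul]
      rfl
    · have : j = 0 := by omega
      subst this
      have hmem : ¬ ((0:Int)) ∈ PySem.List.pyRange 1 ((nn:Int)+1) 1 := by
        rw [PySem.List.mem_pyRange_one]; omega
      simp only [Nat.cast_zero, if_neg hmem]
      simp [gS]

lemma pv_hProd_full (nn j : ℕ) (hj : j < nn+1) : hProd nn j = hFull j := by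
  unfold hProd hFull
  rw [Finset.filter_true_of_mem (fun p hp => le_trans (Nat.le_of_mem_primeFactors hp) (by omega))]

lemma pv_hProd_one (j : ℕ) : ((hProd 1 j).val : Int) = 1 := by
  unfold hProd
  rw [Finset.filter_false_of_mem
    (fun p hp => by have := (Nat.mem_primeFactors.1 hp).1.two_le; omega),
    Finset.prod_empty, pv_val_one]

lemma pv_ipSpec_one (j : ℕ) : ipSpec 1 j = decide (2 ≤ j) := by
  unfold ipSpec
  rw [decide_eq_decide]
  exact ⟨fun ⟨a,_⟩ => a, fun a => ⟨a, fun p hle hpp _ => absurd hpp.two_le (by omega)⟩⟩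

lemma pv_spfSpec_one (j : ℕ) : spfSpec 1 j = 0 := by
  unfold spfSpec
  by_cases hj2 : 2 ≤ j
  · rw [if_neg]
    rintro ⟨_, hle⟩
    have := (Nat.minFac_prime (by omega : j ≠ 1)).two_le
    omega
  · rw [if_neg (fun h => hj2 h.1)]

lemma pv_A_eq (nn : ℕ) (h1 : 1 ≤ nn) : sieve_g (nn:Int) = (List.range (nn+1)).map gS := by
  have htn : (((nn:Int))+1).toNat = nn+1 := by omega
  unfold sieve_g
  dsimp only
  rw [htn]
  have hbase1 : ∀ j, j < nn+1 →
      (PySem.List.pySetD (PySem.List.pySetD (List.replicate (nn+1) true) 0 false) 1 false).getD j false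
        = ipSpec 1 j := by
    intro j hj
    have hlen1 : j < (PySem.List.pySetD (List.replicate (nn+1) true) 0 false).length := by
      rw [PySem.List.length_pySetD, List.length_replicate]; omega
    rw [pv_setD_getD _ 1 (by omega) false false j (by omega),
      pv_setD_getD _ 0 (by omega) false false j (by simpa using hj), pv_ipSpec_one]
    by_cases hj1 : (j:Int) = 1
    · rw [if_pos hj1, eq_comm, decide_eq_false_iff_not]; omega
    · rw [if_neg hj1]
      by_cases hj0 : (j:Int) = 0
      · rw [if_pos hj0, eq_comm, decide_eq_false_iff_not]; omega
      · rw [if_neg hj0, List.getD_replicate _ hj, eq_comm, decide_eq_true_iff]; omega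
  have hinv := pv_A_inv nn nn h1 le_rfl
    (PySem.List.pySetD (PySem.List.pySetD (List.replicate (nn+1) true) 0 false) 1 false,
      List.replicate (nn+1) (1:Int))
    (by simp [PySem.List.length_pySetD])
    (by simp)
    hbase1
    (fun j hj => by rw [List.getD_replicate _ hj, pv_hProd_one])
  obtain ⟨_, hlen2, _, hval2⟩ := hinv
  exact pv_gBuild_spec nn _ (fun j hj => by rw [hval2 j hj, pv_hProd_full nn j hj])

lemma pv_B_eq (nn : ℕ) (h1 : 1 ≤ nn) : sieve_g_alt (nn:Int) = (List.range (nn+1)).map gS := by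
  have htn : (((nn:Int))+1).toNat = nn+1 := by omega
  unfold sieve_g_alt
  dsimp only
  rw [htn]
  obtain ⟨slen, sval⟩ := pv_B_spf_inv nn nn h1 le_rfl
    (List.replicate (nn+1) (0:Int)) (by simp)
    (fun j hj => by rw [List.getD_replicate _ hj, pv_spfSpec_one])
  have hspf : ∀ j, j < nn+1 →
      ((PySem.List.pyRange 2 ((nn:Int)+1) 1).foldl (sieveB_spfStep (nn:Int))
        (List.replicate (nn+1) (0:Int))).getD j 0 = spfSpec nn j := sval
  obtain ⟨hlen, hval⟩ := pv_B_h_inv nn nn h1 le_rfl _ hspf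
    (List.replicate (nn+1) (1:Int)) (by simp)
    (fun j hj => List.getD_replicate _ hj)
  exact pv_gBuild_spec nn _ (fun j hj => by rw [hval j hj, if_pos (by omega)])

-- ===== VERDICT (by name: the statement is the Claim_ definition above) =====
theorem sieve_g_spec : Claim_equal_sieve_g := by
  intro n _ hpre
  have h1 : 1 ≤ n := hpre
  obtain ⟨nn, rfl⟩ : ∃ nn : ℕ, n = (nn : Int) := ⟨n.toNat, by omega⟩
  have hnn : 1 ≤ nn := by exact_mod_cast h1
  show sieve_g _ = sieve_g_alt _
  rw [pv_A_eq nn hnn, pv_B_eq nn hnn]
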